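-- pv_equiv track=rewrite | github.com/sivaconnects/exchange_filings_dashboard | scrapers/main.py | build_combined
-- ===== SOURCE A (Python) =====
-- def build_combined(nse: dict, bse: dict) -> dict:
--     """
--     Build a combined NSE+BSE flat view, normalising BSE categories
--     to match NSE category names where possible.
--     """
--     BSE_TO_NSE_CAT = {
--         "Board Meeting":        "board_meetings",
--         "Financial Result":     "financial_results",
--         "Corporate Action":     "corporate_actions",
--         "Shareholding Pattern": "shareholding_patterns",
--         "AGM / EGM":            "corporate_announcements",
--         "Company Update":       "corporate_announcements",
--         "New Listing":          "corporate_announcements",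
--         "Integrated Filings":   "corporate_announcements",
--         "Others":               "corporate_announcements",
--         "Insider Trading / SAST": "insider_trading",
--     }
--
--     combined = {"equity": {}, "sme": {}}
--     std_cats = [
--         "corporate_announcements", "board_meetings", "financial_results",
--         "corporate_actions", "shareholding_patterns", "insider_trading",
--     ]
--
--     for seg in ("equity", "sme"):
--         for cat in std_cats:
--             combined[seg][cat] = list(nse.get(seg, {}).get(cat, []))
--
--         # Merge BSE by mapping its categories
--         for bse_cat_name, bse_filings in bse.get(seg, {}).items():
--             if not isinstance(bse_filings, list):
--                 continue
--             # Determine target combined bucket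
--             # Try category label on first item
--             target = None
--             if bse_filings:
--                 cat_label = bse_filings[0].get("category", "")
--                 target = BSE_TO_NSE_CAT.get(cat_label)
--             if not target:
--                 target = BSE_TO_NSE_CAT.get(bse_cat_name, "corporate_announcements")
--             combined[seg].setdefault(target, []).extend(bse_filings)
--
--     return combined
-- ===== SOURCE B (Python) =====
-- def build_combined(nse: dict, bse: dict) -> dict:
--     """Per-bucket rebuild: no mutable accumulator dict at all. Each standard
--     category's bucket is produced independently by scanning the segment's BSE
--     entries, keeping those whose resolved target is that category, and
--     flattening their filings after the NSE part. Sound because every resolved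
--     target is one of the six standard categories."""
--     BSE_TO_NSE_CAT = {
--         "Board Meeting":        "board_meetings",
--         "Financial Result":     "financial_results",
--         "Corporate Action":     "corporate_actions",
--         "Shareholding Pattern": "shareholding_patterns",
--         "AGM / EGM":            "corporate_announcements",
--         "Company Update":       "corporate_announcements",
--         "New Listing":          "corporate_announcements",
--         "Integrated Filings":   "corporate_announcements",
--         "Others":               "corporate_announcements",
--         "Insider Trading / SAST": "insider_trading",
--     }
--     STD_CATS = [
--         "corporate_announcements", "board_meetings", "financial_results",
--         "corporate_actions", "shareholding_patterns", "insider_trading",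
--     ]
--
--     def resolve(name, filings):
--         target = None
--         if filings:
--             target = BSE_TO_NSE_CAT.get(filings[0].get("category", ""))
--         if not target:
--             target = BSE_TO_NSE_CAT.get(name, "corporate_announcements")
--         return target
--
--     return {
--         seg: {
--             cat: list(nse.get(seg, {}).get(cat, []))
--                  + [f
--                     for name, filings in bse.get(seg, {}).items()
--                     if isinstance(filings, list) and resolve(name, filings) == cat
--                     for f in filings]
--             for cat in STD_CATS
--         }
--         for seg in ("equity", "sme")
--     }
-- ===== Notes on version B (the rewrite author's own statement) =====
-- stated objective: alternative
-- what changed: A makes one pass over the BSE entries, dispatching each into a mutable combined dict via setdefault+extend; B keeps no accumulator at all and instead builds each of the six standard buckets independently by a per-bucket filtering scan of the BSE entries (filter on resolved target, flatten), changing the traversal from entry-major to bucket-major.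
import Mathlib
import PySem

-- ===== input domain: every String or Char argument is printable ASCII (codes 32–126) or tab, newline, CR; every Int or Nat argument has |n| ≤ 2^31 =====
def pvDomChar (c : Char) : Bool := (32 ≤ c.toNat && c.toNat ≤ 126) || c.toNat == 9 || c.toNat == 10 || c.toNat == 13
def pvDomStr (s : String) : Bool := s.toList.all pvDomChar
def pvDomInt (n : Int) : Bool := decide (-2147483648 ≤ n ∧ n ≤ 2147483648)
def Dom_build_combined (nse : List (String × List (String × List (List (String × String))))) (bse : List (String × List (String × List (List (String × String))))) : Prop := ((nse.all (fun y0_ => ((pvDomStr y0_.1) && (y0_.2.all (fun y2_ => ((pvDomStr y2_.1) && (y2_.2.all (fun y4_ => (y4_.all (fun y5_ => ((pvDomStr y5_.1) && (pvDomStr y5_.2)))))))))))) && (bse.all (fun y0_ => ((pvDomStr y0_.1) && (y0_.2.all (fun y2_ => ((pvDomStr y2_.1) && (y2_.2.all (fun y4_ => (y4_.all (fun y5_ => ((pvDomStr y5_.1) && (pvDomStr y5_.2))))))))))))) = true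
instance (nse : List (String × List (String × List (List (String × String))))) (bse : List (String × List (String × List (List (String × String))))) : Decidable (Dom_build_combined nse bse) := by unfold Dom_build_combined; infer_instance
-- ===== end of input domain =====

-- ===== PORT A =====
-- One honest line: B replaces A's single entry-major pass with a mutable combined
-- dict (setdefault+extend) by six independent bucket-major filtering scans of the
-- BSE entries (objective: alternative, same asymptotic cost).
def pvBseToNseCat : PySem.Dict String String := PySem.Dict.ofList [
  ("Board Meeting",        "board_meetings"),
  ("Financial Result",     "financial_results"),
  ("Corporate Action",     "corporate_actions"),
  ("Shareholding Pattern", "shareholding_patterns"),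
  ("AGM / EGM",            "corporate_announcements"),
  ("Company Update",       "corporate_announcements"),
  ("New Listing",          "corporate_announcements"),
  ("Integrated Filings",   "corporate_announcements"),
  ("Others",               "corporate_announcements"),
  ("Insider Trading / SAST", "insider_trading")]

def pvStdCats : List String :=
  ["corporate_announcements", "board_meetings", "financial_results",
   "corporate_actions", "shareholding_patterns", "insider_trading"]

-- one iteration of A's `for seg in ("equity","sme")` body (the body only reads/writes
-- combined[seg], so the two segment iterations are transcribed independently)
def pvSegA (nse : List (String × List (String × List (List (String × String)))))
    (bse : List (String × List (String × List (List (String × String)))))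
    (seg : String) : List (String × List (List (String × String))) :=
  let nseSeg : PySem.Dict String (List (List (String × String))) :=
    PySem.Dict.mk (((PySem.Dict.mk nse).get? seg).getD [])
  -- for cat in std_cats: combined[seg][cat] = list(nse.get(seg, {}).get(cat, []))
  let d0 : PySem.Dict String (List (List (String × String))) :=
    pvStdCats.foldl (fun d cat => d.insert cat (nseSeg.getD cat [])) PySem.Dict.empty
  -- for bse_cat_name, bse_filings in bse.get(seg, {}).items(): …
  -- (the isinstance(bse_filings, list) guard is always true under the typed domain)
  let bseSeg := ((PySem.Dict.mk bse).get? seg).getD []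
  let d1 := bseSeg.foldl (fun d p =>
    let target : Option String :=
      match p.2 with
      | [] => none
      | f :: _ => pvBseToNseCat.get? ((PySem.Dict.mk f).getD "category" "")
    let tgt : String :=
      match target with
      | some s => if s = "" then pvBseToNseCat.getD p.1 "corporate_announcements" else s
      | none => pvBseToNseCat.getD p.1 "corporate_announcements"
    -- combined[seg].setdefault(target, []).extend(bse_filings)
    d.modify tgt [] (fun v => v ++ p.2)) d0
  d1.items

def build_combined (nse : List (String × List (String × List (List (String × String))))) (bse : List (String × List (String × List (List (String × String))))) : List (String × List (String × List (List (String × String)))) :=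
  [("equity", pvSegA nse bse "equity"), ("sme", pvSegA nse bse "sme")]

-- ===== PORT B =====
-- Source B's resolve(name, filings)
def pvResolve (p : String × List (List (String × String))) : String :=
  match p.2 with
  | [] => pvBseToNseCat.getD p.1 "corporate_announcements"
  | f :: _ =>
    match pvBseToNseCat.get? ((PySem.Dict.mk f).getD "category" "") with
    | some s => if s = "" then pvBseToNseCat.getD p.1 "corporate_announcements" else s
    | none => pvBseToNseCat.getD p.1 "corporate_announcements"

-- Source B's inner comprehension: filings of entries whose resolved target is cat,
-- flattened in iteration order (isinstance guard always true under the typed domain)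
def pvCollect (cat : String) : List (String × List (List (String × String))) → List (List (String × String))
  | [] => []
  | p :: l => if pvResolve p = cat then p.2 ++ pvCollect cat l else pvCollect cat l

def build_combined_alt (nse : List (String × List (String × List (List (String × String))))) (bse : List (String × List (String × List (List (String × String))))) : List (String × List (String × List (List (String × String)))) :=
  ["equity", "sme"].map (fun seg =>
    (seg, pvStdCats.map (fun cat =>
      (cat, (PySem.Dict.mk (((PySem.Dict.mk nse).get? seg).getD [])).getD cat []
        ++ pvCollect cat (((PySem.Dict.mk bse).get? seg).getD [])))))

-- ===== PRECONDITION & SPEC =====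
def Spec_build_combined (nse : List (String × List (String × List (List (String × String))))) (bse : List (String × List (String × List (List (String × String))))) (out : List (String × List (String × List (List (String × String))))) : Prop := out = build_combined_alt nse bse
instance (nse : List (String × List (String × List (List (String × String))))) (bse : List (String × List (String × List (List (String × String))))) (out : List (String × List (String × List (List (String × String))))) : Decidable (Spec_build_combined nse bse out) := by
  unfold Spec_build_combined
  letI h2 : DecidableEq (List (List (String × String))) := instDecidableEqList
  letI h4 : DecidableEq (List (String × List (List (String × String)))) := instDecidableEqList
  letI h6 : DecidableEq (List (String × List (String × List (List (String × String))))) := instDecidableEqList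
  exact h6 _ _

-- ===== CLAIM (what is proved, stated in full; the proofs are below) =====
def Claim_equal_build_combined : Prop := ∀ (nse : List (String × List (String × List (List (String × String))))) (bse : List (String × List (String × List (List (String × String))))), Dom_build_combined nse bse → Spec_build_combined nse bse (build_combined nse bse)

-- ===== LEMMAS AND PROOFS =====

-- A's inline target computation is pvResolve
lemma pvStepA_eq (d : PySem.Dict String (List (List (String × String))))
    (p : String × List (List (String × String))) :
    (let target : Option String :=
      match p.2 with
      | [] => none
      | f :: _ => pvBseToNseCat.get? ((PySem.Dict.mk f).getD "category" "")
     let tgt : String :=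
      match target with
      | some s => if s = "" then pvBseToNseCat.getD p.1 "corporate_announcements" else s
      | none => pvBseToNseCat.getD p.1 "corporate_announcements"
     d.modify tgt [] (fun v => v ++ p.2))
    = d.modify (pvResolve p) [] (fun v => v ++ p.2) := by
  rcases p with ⟨n, fs⟩
  cases fs <;> simp [pvResolve]

lemma pvDictLit : pvBseToNseCat = PySem.Dict.mk [
  ("Board Meeting",        "board_meetings"),
  ("Financial Result",     "financial_results"),
  ("Corporate Action",     "corporate_actions"),
  ("Shareholding Pattern", "shareholding_patterns"),
  ("AGM / EGM",            "corporate_announcements"),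
  ("Company Update",       "corporate_announcements"),
  ("New Listing",          "corporate_announcements"),
  ("Integrated Filings",   "corporate_announcements"),
  ("Others",               "corporate_announcements"),
  ("Insider Trading / SAST", "insider_trading")] := by decide

lemma pvGet?_mem (s v : String) (h : pvBseToNseCat.get? s = some v) : v ∈ pvStdCats := by
  rw [pvDictLit] at h
  simp only [PySem.Dict.get?_mk_cons] at h
  split_ifs at h
  all_goals first
    | (injection h with h; subst h; decide)
    | (simp [PySem.Dict.get?] at h)

lemma pvGetD_mem (s : String) :
    pvBseToNseCat.getD s "corporate_announcements" ∈ pvStdCats := by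
  rw [PySem.Dict.getD_eq_get?_getD]
  cases h : pvBseToNseCat.get? s with
  | none => decide
  | some v => exact pvGet?_mem s v h

lemma pvResolve_mem (p : String × List (List (String × String))) : pvResolve p ∈ pvStdCats := by
  rcases p with ⟨n, fs⟩
  cases fs with
  | nil => exact pvGetD_mem n
  | cons f rest =>
    simp only [pvResolve]
    cases h : pvBseToNseCat.get? ((PySem.Dict.mk f).getD "category" "") with
    | none => exact pvGetD_mem n
    | some s =>
      by_cases hs : s = ""
      · simp [hs]; exact pvGetD_mem n
      · simp [hs]; exact pvGet?_mem _ s h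

-- value of A's merge fold at any key is the start value plus B's per-bucket collection
lemma pvFoldA_getD (l : List (String × List (List (String × String))))
    (d : PySem.Dict String (List (List (String × String)))) (c : String) :
    (l.foldl (fun d p => d.modify (pvResolve p) [] (fun v => v ++ p.2)) d).getD c []
      = d.getD c [] ++ pvCollect c l := by
  induction l generalizing d with
  | nil => simp [pvCollect]
  | cons p l ih =>
    simp only [List.foldl_cons, pvCollect, ih, PySem.Dict.getD_modify]
    by_cases h : c = pvResolve p
    · simp [h, List.append_assoc]
    · rw [if_neg h, if_neg (fun hh : pvResolve p = c => h hh.symm)]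

-- keys of A's merge fold stay exactly pvStdCats
lemma pvFoldA_keys (l : List (String × List (List (String × String))))
    (d : PySem.Dict String (List (List (String × String)))) (hk : d.keys = pvStdCats) :
    (l.foldl (fun d p => d.modify (pvResolve p) [] (fun v => v ++ p.2)) d).keys = pvStdCats := by
  induction l generalizing d with
  | nil => exact hk
  | cons p l ih =>
    simp only [List.foldl_cons]
    apply ih
    rw [PySem.Dict.keys_modify, PySem.Dict.keys_insert_of_contains, hk]
    rw [PySem.Dict.contains_iff_mem_keys, hk]
    exact pvResolve_mem p

-- d0's items: the six standard buckets with their NSE contents, in order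
lemma pvD0_items (nseSeg : PySem.Dict String (List (List (String × String)))) :
    (pvStdCats.foldl (fun d cat => d.insert cat (nseSeg.getD cat [])) PySem.Dict.empty).items
      = pvStdCats.map (fun c => (c, nseSeg.getD c [])) := by
  have h := PySem.Dict.items_foldl_insert_fresh pvStdCats (fun c => c)
    (fun c => nseSeg.getD c []) PySem.Dict.empty
    (by intro a _; simp [PySem.Dict.contains_empty]) (by decide)
  simpa using h

-- a dict with Nodup keys is the map of its keys through getD
lemma pvItems_eq_map_keys (d : PySem.Dict String (List (List (String × String))))
    (h : d.keys.Nodup) :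
    d.items = d.keys.map (fun k => (k, d.getD k [])) := by
  simp only [PySem.Dict.keys, List.map_map]
  refine (List.map_id d.items).symm.trans ?_
  apply List.map_congr_left
  intro e he
  have : d.getD e.1 [] = e.2 :=
    PySem.Dict.getD_of_mem_items d (by simpa using he) h []
  simp [this, Function.comp]

-- each segment of A's result, in B's bucket-major shape
lemma pvSeg_eq (nse bse : List (String × List (String × List (List (String × String)))))
    (seg : String) :
    pvSegA nse bse seg = pvStdCats.map (fun cat =>
      (cat, (PySem.Dict.mk (((PySem.Dict.mk nse).get? seg).getD [])).getD cat []
        ++ pvCollect cat (((PySem.Dict.mk bse).get? seg).getD []))) := by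
  unfold pvSegA
  simp only [pvStepA_eq]
  set nseSeg : PySem.Dict String (List (List (String × String))) :=
    PySem.Dict.mk (((PySem.Dict.mk nse).get? seg).getD []) with hnseSeg
  set bseSeg := ((PySem.Dict.mk bse).get? seg).getD [] with hbseSeg
  set d0 := pvStdCats.foldl (fun d cat => d.insert cat (nseSeg.getD cat [])) PySem.Dict.empty with hd0
  have hkeys0 : d0.keys = pvStdCats := by
    simp only [PySem.Dict.keys, hd0, pvD0_items, List.map_map]
    rfl
  have hkeys1 : (bseSeg.foldl (fun d p => d.modify (pvResolve p) [] (fun v => v ++ p.2)) d0).keys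
      = pvStdCats := pvFoldA_keys bseSeg d0 hkeys0
  rw [pvItems_eq_map_keys _ (by rw [hkeys1]; decide), hkeys1]
  apply List.map_congr_left
  intro c hc
  rw [pvFoldA_getD]
  have hmem : (c, nseSeg.getD c []) ∈ d0.items := by
    rw [hd0, pvD0_items]
    exact List.mem_map_of_mem hc
  have hnodup0 : d0.keys.Nodup := by rw [hkeys0]; decide
  rw [PySem.Dict.getD_of_mem_items d0 hmem hnodup0]

-- ===== VERDICT (by name: the statement is the Claim_ definition above) =====
theorem build_combined_spec : Claim_equal_build_combined := by
  intro nse bse _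
  unfold Spec_build_combined build_combined build_combined_alt
  simp only [List.map_cons, List.map_nil, pvSeg_eq]
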